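-- pv_equiv track=rewrite | github.com/absenth/agridies | agridies.py | category_check
-- ===== SOURCE A (Python) =====
-- def category_check(valueToCheck):
--     """ Function to check valid category input """
--     equals = False
--     numbers = []
--     for i in range(1, 21):
--         numbers.append(i)
--     letters = ['A', 'B', 'C', 'D', 'E', 'F']
--     for element in numbers:
--         for signum in letters:
--             if str(element) + signum == valueToCheck:
--                 equals = True
--     return equals
-- ===== SOURCE B (Python) =====
-- def category_check(valueToCheck):
--     """ Function to check valid category input """
--     if not isinstance(valueToCheck, str) or len(valueToCheck) < 2:
--         return False
--     prefix, signum = valueToCheck[:-1], valueToCheck[-1]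
--     if signum not in ('A', 'B', 'C', 'D', 'E', 'F') or not prefix.isdigit():
--         return False
--     number = int(prefix)
--     return prefix == str(number) and 1 <= number <= 20
-- ===== Notes on version B (the rewrite author's own statement) =====
-- stated objective: simpler
-- what changed: B parses the string (last letter in A-F, canonical decimal prefix in 1..20, checked via prefix == str(int(prefix))) instead of enumerating and comparing all 120 candidate strings.
import Mathlib
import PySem

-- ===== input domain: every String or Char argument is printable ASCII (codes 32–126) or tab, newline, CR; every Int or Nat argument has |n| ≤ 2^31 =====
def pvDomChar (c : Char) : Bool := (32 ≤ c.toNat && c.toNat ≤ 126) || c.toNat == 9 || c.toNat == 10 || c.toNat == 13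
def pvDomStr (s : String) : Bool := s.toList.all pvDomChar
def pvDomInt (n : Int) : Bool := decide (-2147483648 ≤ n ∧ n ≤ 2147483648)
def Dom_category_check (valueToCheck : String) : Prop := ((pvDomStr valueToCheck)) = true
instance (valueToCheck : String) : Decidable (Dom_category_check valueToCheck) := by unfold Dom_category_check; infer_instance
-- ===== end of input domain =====

-- B parses the string (last letter + canonical decimal pref 1..20) instead of A's scan over all 120 candidate strings; objective: simpler.

-- ===== PORT A =====
def category_check (valueToCheck : String) : Bool :=
  -- equals = False; numbers built by appending range(1, 21); letters list; nested loops setting equals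
  let numbers := (PySem.List.pyRange 1 21 1).foldl (fun acc i => acc ++ [i]) ([] : List Int)
  let letters : List String := ["A", "B", "C", "D", "E", "F"]
  numbers.foldl (fun equals element =>
    letters.foldl (fun equals signum =>
      if (PySem.Int.toStr element ++ signum) == valueToCheck then true else equals) equals) false

-- ===== PORT B =====
def category_check_alt (valueToCheck : String) : Bool :=
  let cs := valueToCheck.toList
  if cs.length < 2 then false
  else
    let pref := PySem.List.slice cs none (some (-1))          -- valueToCheck[:-1]
    match PySem.List.pyGet? cs (-1) with                         -- valueToCheck[-1]
    | none => false                                              -- unreachable: length ≥ 2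
    | some signum =>
      if !(['A', 'B', 'C', 'D', 'E', 'F'].contains signum) then false
      else if !(PySem.Chars.strIsdigit pref) then false
      else
        match PySem.Int.ofChars? pref with                     -- int(pref)
        | none => false                                          -- unreachable: nonempty digit string
        | some number =>
          pref == PySem.Int.toChars number && decide (1 ≤ number) && decide (number ≤ 20)

-- ===== PRECONDITION & SPEC =====
def Spec_category_check (valueToCheck : String) (out : Bool) : Prop := out = category_check_alt valueToCheck
instance (valueToCheck : String) (out : Bool) : Decidable (Spec_category_check valueToCheck out) := by unfold Spec_category_check; infer_instance

-- ===== CLAIM (what is proved, stated in full; the proofs are below) =====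
def Claim_equal_category_check : Prop := ∀ (valueToCheck : String), Dom_category_check valueToCheck → Spec_category_check valueToCheck (category_check valueToCheck)

-- ===== LEMMAS AND PROOFS =====

-- inner loop of A: 'if hit then equals = True' over a list is boolean any
lemma foldl_if_true_eq_any {α : Type} (p : α → Bool) (l : List α) (b : Bool) :
    l.foldl (fun eq s => if p s then true else eq) b = (b || l.any p) := by
  induction l generalizing b with
  | nil => simp
  | cons x xs ih =>
    simp only [List.foldl_cons, List.any_cons, ih]
    cases p x <;> simp

lemma foldl_or_eq_any {α : Type} (q : α → Bool) (l : List α) (b : Bool) :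
    l.foldl (fun eq s => eq || q s) b = (b || l.any q) := by
  induction l generalizing b with
  | nil => simp
  | cons x xs ih => simp [List.foldl_cons, ih, Bool.or_assoc]

-- A is a membership test among the 120 candidate strings
lemma category_check_eq_any (v : String) :
    category_check v =
      (PySem.List.pyRange 1 21 1).any (fun e =>
        (["A","B","C","D","E","F"] : List String).any (fun s => (PySem.Int.toStr e ++ s) == v)) := by
  unfold category_check
  rw [PySem.List.foldl_append_singleton]
  simp only [List.nil_append]
  rw [show (fun (equals : Bool) (element : Int) =>
        (["A","B","C","D","E","F"] : List String).foldl (fun eq s =>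
          if (PySem.Int.toStr element ++ s) == v then true else eq) equals)
      = fun equals element => equals ||
        (["A","B","C","D","E","F"] : List String).any (fun s => (PySem.Int.toStr element ++ s) == v) from
    funext fun equals => funext fun element => foldl_if_true_eq_any _ _ _]
  rw [foldl_or_eq_any]
  simp

lemma category_check_iff (v : String) :
    category_check v = true ↔
      ∃ e, e ∈ PySem.List.pyRange 1 21 1 ∧
        ∃ s, s ∈ (["A","B","C","D","E","F"] : List String) ∧ PySem.Int.toStr e ++ s = v := by
  rw [category_check_eq_any]
  simp [List.any_eq_true]

lemma b_of_a (v : String) (h : category_check v = true) : category_check_alt v = true := by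
  rw [category_check_iff] at h
  obtain ⟨e, he, s, hs, hv⟩ := h
  rw [PySem.List.mem_pyRange_one] at he
  subst hv
  obtain ⟨h1, h2⟩ := he
  interval_cases e <;> fin_cases hs <;>
    (unfold category_check_alt; simp only [String.toList_append, PySem.Int.toList_toStr]; decide)

lemma a_of_b (v : String) (h : category_check_alt v = true) : category_check v = true := by
  simp only [category_check_alt, PySem.List.slice_to_neg_one] at h
  by_cases hlen : v.toList.length < 2
  · rw [if_pos hlen] at h; exact absurd h (by simp)
  rw [if_neg hlen] at h
  rcases hget : PySem.List.pyGet? v.toList (-1) with _ | signum <;> simp only [hget] at h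
  · exact absurd h (by simp)
  split_ifs at h with hsig hdig
  rcases hn : PySem.Int.ofChars? v.toList.dropLast with _ | n <;> simp only [hn] at h
  · exact absurd h (by simp)
  simp only [Bool.and_eq_true, beq_iff_eq, decide_eq_true_eq] at h
  obtain ⟨⟨hpre, h1⟩, h2⟩ := h
  rw [category_check_iff]
  refine ⟨n, by rw [PySem.List.mem_pyRange_one]; omega, ?_⟩
  rw [PySem.List.pyGet?_neg_one] at hget
  have hne : v.toList ≠ [] := by
    intro hnil; rw [hnil] at hget; simp [List.getLast?] at hget
  have hlast : v.toList.getLast hne = signum := by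
    rw [List.getLast?_eq_some_getLast hne] at hget
    exact Option.some.inj hget
  have hsplit : v.toList.dropLast ++ [signum] = v.toList := by
    rw [← hlast]; exact List.dropLast_append_getLast hne
  have hmem : signum ∈ (['A','B','C','D','E','F'] : List Char) := by
    by_contra hmemn
    simp only [List.mem_cons, List.not_mem_nil, not_or] at hmemn
    obtain ⟨ha, hb, hc, hd, he, hf, -⟩ := hmemn
    have himp : ¬signum = 'A' → ¬signum = 'B' → ¬signum = 'C' → ¬signum = 'D' → ¬signum = 'E' → signum = 'F' := by
      simpa using hsig
    exact hf (himp ha hb hc hd he)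
  have key : ∀ t : String, t.toList = [signum] → t ∈ (["A","B","C","D","E","F"] : List String) →
      PySem.Int.toStr n ++ t = v := by
    intro t ht _
    apply String.toList_injective
    rw [String.toList_append, PySem.Int.toList_toStr, ht, ← hpre, hsplit]
  fin_cases hmem
  · exact ⟨"A", by simp, key "A" rfl (by simp)⟩
  · exact ⟨"B", by simp, key "B" rfl (by simp)⟩
  · exact ⟨"C", by simp, key "C" rfl (by simp)⟩
  · exact ⟨"D", by simp, key "D" rfl (by simp)⟩
  · exact ⟨"E", by simp, key "E" rfl (by simp)⟩
  · exact ⟨"F", by simp, key "F" rfl (by simp)⟩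

-- ===== VERDICT (by name: the statement is the Claim_ definition above) =====
theorem category_check_spec : Claim_equal_category_check := by
  intro v _
  unfold Spec_category_check
  by_cases hA : category_check v = true
  · rw [hA, (b_of_a v hA)]
  · simp only [Bool.not_eq_true] at hA
    rw [hA]
    by_cases hB : category_check_alt v = true
    · exact absurd (a_of_b v hB) (by simp [hA])
    · simp only [Bool.not_eq_true] at hB; rw [hB]
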